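-- pv_equiv track=rewrite | github.com/Wundrfull/godauto | src/gdauto/formats/project_cfg.py | _bracket_depth
-- ===== SOURCE A (Python) =====
-- def _bracket_depth(text: str) -> int:
--     """Count net bracket depth ({/[ open, }/] close), respecting strings.
--
--     Returns a positive number if brackets are still open.
--     """
--     depth = 0
--     in_string = False
--     i = 0
--     length = len(text)
--     while i < length:
--         ch = text[i]
--         if in_string:
--             if ch == '\\' and i + 1 < length:
--                 i += 2
--                 continue
--             if ch == '"':
--                 in_string = False
--         else:
--             if ch == '"':
--                 in_string = True
--             elif ch in ('{', '[', '('):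
--                 depth += 1
--             elif ch in ('}', ']', ')'):
--                 depth -= 1
--         i += 1
--     return depth
-- ===== SOURCE B (Python) =====
-- def _bracket_depth(text: str) -> int:
--     """Count net bracket depth ({/[/( open, }/]/) close), respecting strings.
--
--     Staged algorithm: split the text on '"'; walk the segments keeping only
--     those that lie outside string literals (a closing quote is escaped exactly
--     when the segment before it ends in an odd run of backslashes, since A's
--     left-to-right escape pairing consumes backslash runs pairwise); then count
--     opening and closing brackets in the concatenation of the kept segments.
--     """
--     kept = []
--     in_string = False
--     for seg in text.split('"'):
--         if not in_string:
--             kept.append(seg)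
--             in_string = True
--         elif (len(seg) - len(seg.rstrip('\\'))) % 2 == 0:
--             in_string = False
--     outside = ''.join(kept)
--     return sum(outside.count(c) for c in '{[(') - sum(outside.count(c) for c in '}])')
-- ===== Notes on version B (the rewrite author's own statement) =====
-- stated objective: faster
-- what changed: Replaces A's per-character index/flag state machine by staged passes: split the text at double-quote characters, keep the segments outside string literals using the parity of the trailing backslash run before each closing quote, then count opening and closing brackets in the concatenation of the kept segments with str.count.
import Mathlib
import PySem

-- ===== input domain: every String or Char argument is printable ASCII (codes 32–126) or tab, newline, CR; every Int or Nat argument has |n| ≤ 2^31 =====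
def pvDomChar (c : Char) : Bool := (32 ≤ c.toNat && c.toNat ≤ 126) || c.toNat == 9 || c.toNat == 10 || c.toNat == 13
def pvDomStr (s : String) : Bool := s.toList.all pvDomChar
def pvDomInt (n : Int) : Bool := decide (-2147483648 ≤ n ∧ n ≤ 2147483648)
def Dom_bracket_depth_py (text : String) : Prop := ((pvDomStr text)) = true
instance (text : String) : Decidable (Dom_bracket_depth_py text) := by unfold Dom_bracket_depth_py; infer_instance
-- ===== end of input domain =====

-- B replaces A's per-character state machine by staged passes: split the text on '"',
-- keep the segments outside string literals (a closing quote is escaped iff the segment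
-- before it ends in an odd run of backslashes), then count brackets in the kept part.

-- ===== PORT A =====
-- A's while loop over i with the in_string flag, as structural recursion on the
-- remaining characters (i+=2 = drop two; 'i + 1 < length' = rest nonempty).
def bdGoA : List Char → Bool → Int → Int
  | [], _, depth => depth
  | ch :: rest, inString, depth =>
    if inString then
      if ch = '\\' ∧ rest ≠ [] then
        bdGoA rest.tail inString depth
      else if ch = '"' then
        bdGoA rest false depth
      else
        bdGoA rest inString depth
    else
      if ch = '"' then
        bdGoA rest true depth
      else if ch = '{' ∨ ch = '[' ∨ ch = '(' then
        bdGoA rest inString (depth + 1)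
      else if ch = '}' ∨ ch = ']' ∨ ch = ')' then
        bdGoA rest inString (depth - 1)
      else
        bdGoA rest inString depth
  termination_by l _ _ => l.length
  decreasing_by all_goals (simp [List.length_tail]; try omega)

def bracket_depth_py (text : String) : Int := bdGoA text.toList false 0

-- ===== PORT B =====
-- seg.rstrip('\\') — exact for a single-character strip set: drop trailing backslashes
def bdRstripBS (seg : List Char) : List Char :=
  (seg.reverse.dropWhile (fun c => c == '\\')).reverse

-- Source B's for loop over text.split('"'): state = (kept segments, in_string flag)
def bdStepB (st : List (List Char) × Bool) (seg : List Char) : List (List Char) × Bool :=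
  if st.2 = false then (st.1 ++ [seg], true)
  else if (seg.length - (bdRstripBS seg).length) % 2 = 0 then (st.1, false)
  else st

def bracket_depth_py_alt (text : String) : Int :=
  let segs := PySem.Chars.splitOn text.toList ['"']
  let st := segs.foldl bdStepB ([], false)
  let outside := PySem.Chars.join [] st.1
  let opens := (['{', '[', '('].map (fun c => (PySem.Chars.count outside [c] : Int))).sum
  let closes := (['}', ']', ')'].map (fun c => (PySem.Chars.count outside [c] : Int))).sum
  opens - closes

-- ===== PRECONDITION & SPEC =====
def Spec_bracket_depth_py (text : String) (out : Int) : Prop := out = bracket_depth_py_alt text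
instance (text : String) (out : Int) : Decidable (Spec_bracket_depth_py text out) := by unfold Spec_bracket_depth_py; infer_instance

-- ===== CLAIM (what is proved, stated in full; the proofs are below) =====
def Claim_equal_bracket_depth_py : Prop := ∀ (text : String), Dom_bracket_depth_py text → Spec_bracket_depth_py text (bracket_depth_py text)

-- ===== LEMMAS AND PROOFS =====

-- net bracket contribution of a quote-free piece of text
def bdNet (l : List Char) : Int :=
  ((l.count '{' : Int) + l.count '[' + l.count '(')
    - ((l.count '}' : Int) + l.count ']' + l.count ')')

-- length of the trailing backslash run
def bdTrail (l : List Char) : Nat := (l.reverse.takeWhile (fun c => c == '\\')).length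

theorem bdTakeWhile_len_eq {p : Char → Bool} {l : List Char}
    (h : (l.takeWhile p).length = l.length) : l.takeWhile p = l :=
  (List.takeWhile_prefix p).eq_of_length h

theorem bdTrail_eq_sub (l : List Char) : l.length - (bdRstripBS l).length = bdTrail l := by
  have h := congrArg List.length
    (List.takeWhile_append_dropWhile (p := fun c => c == '\\') (l := l.reverse))
  simp only [List.length_append, List.length_reverse] at h ⊢
  simp only [bdRstripBS, bdTrail, List.length_reverse]
  omega

theorem bdTrail_cons_ne {c : Char} (h : ¬ c = '\\') (s : List Char) :
    bdTrail (c :: s) = bdTrail s := by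
  simp only [bdTrail, List.reverse_cons, List.takeWhile_append]
  split
  · next heq =>
      have : s.reverse.takeWhile (fun c => c == '\\') = s.reverse :=
        bdTakeWhile_len_eq heq
      have hb : (c == '\\') = false := by simp [h]
      simp [List.takeWhile, hb, this, heq]
  · rfl

theorem bdTrail_cons_bs (s : List Char) :
    bdTrail ('\\' :: s) = if s.all (fun c => c == '\\') then s.length + 1 else bdTrail s := by
  simp only [bdTrail, List.reverse_cons, List.takeWhile_append]
  by_cases hall : s.all (fun c => c == '\\')
  · have : s.reverse.takeWhile (fun c => c == '\\') = s.reverse := by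
      apply List.takeWhile_eq_self_iff.mpr
      intro x hx
      exact (List.all_eq_true.mp hall) x (List.mem_reverse.mp hx)
    simp [this, hall, List.takeWhile]
  · have hne : (s.reverse.takeWhile (fun c => c == '\\')).length ≠ s.reverse.length := by
      intro hlen
      apply hall
      apply List.all_eq_true.mpr
      intro x hx
      have hx' : x ∈ s.reverse.takeWhile (fun c => c == '\\') := by
        rw [bdTakeWhile_len_eq hlen]
        exact List.mem_reverse.mpr hx
      exact @List.mem_takeWhile_imp _ (fun c => c == '\\') _ _ hx'
    have hne' : (List.takeWhile (fun c => c == '\\') s.reverse).length ≠ s.length := by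
      simpa using hne
    simp [hne', hall]

theorem bdTrail_all (s : List Char) (h : s.all (fun c => c == '\\') = true) :
    bdTrail s = s.length := by
  have : s.reverse.takeWhile (fun c => c == '\\') = s.reverse := by
    apply List.takeWhile_eq_self_iff.mpr
    intro x hx
    exact (List.all_eq_true.mp h) x (List.mem_reverse.mp hx)
  simp [bdTrail, this]

theorem bdTrail_two_parity (c2 : Char) (s2 : List Char) :
    bdTrail ('\\' :: c2 :: s2) % 2 = bdTrail s2 % 2 := by
  rw [bdTrail_cons_bs]
  by_cases hc2 : c2 = '\\'
  · subst hc2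
    by_cases hall : s2.all (fun c => c == '\\')
    · have h1 : ('\\' :: s2).all (fun c => c == '\\') = true := by simp [hall]
      rw [if_pos h1, bdTrail_all s2 hall]
      simp only [List.length_cons]
      omega
    · have h1 : ('\\' :: s2).all (fun c => c == '\\') = false := by
        simp only [List.all_cons, Bool.and_eq_false_iff]
        right
        simpa using hall
      rw [if_neg (by simp [h1]), bdTrail_cons_bs, if_neg (by simp [hall])]
  · have h1 : (c2 :: s2).all (fun c => c == '\\') = false := by simp [hc2]
    rw [if_neg (by simp [h1]), bdTrail_cons_ne hc2]

-- A: depth accumulator is additive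
theorem bdGoA_add_aux : ∀ (n : Nat) (l : List Char), l.length ≤ n → ∀ (b : Bool) (d : Int),
    bdGoA l b d = d + bdGoA l b 0
  | _, [], _, b, d => by simp [bdGoA]
  | 0, _ :: _, h, _, _ => by simp at h
  | (n+1), c :: rest, h, b, d => by
    have hr : rest.length ≤ n := by simpa using h
    have ht : rest.tail.length ≤ n := le_trans (by simpa using List.length_tail_le rest) hr
    simp only [bdGoA]
    split_ifs <;>
      first
        | exact bdGoA_add_aux n rest.tail ht _ d
        | exact bdGoA_add_aux n rest hr _ d
        | (rw [bdGoA_add_aux n rest hr _ (d + 1), bdGoA_add_aux n rest hr _ (0 + 1)]; ring)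
        | (rw [bdGoA_add_aux n rest hr _ (d - 1), bdGoA_add_aux n rest hr _ (0 - 1)]; ring)

theorem bdGoA_add (l : List Char) (b : Bool) (d : Int) : bdGoA l b d = d + bdGoA l b 0 :=
  bdGoA_add_aux l.length l le_rfl b d

-- A outside a string, over a quote-free piece: adds the net count
theorem bdNet_nil : bdNet [] = 0 := by simp [bdNet]

theorem bdGoA_false_append (s r : List Char) (h : '"' ∉ s) (d : Int) :
    bdGoA (s ++ r) false d = bdGoA r false (d + bdNet s) := by
  induction s generalizing d with
  | nil => simp [bdNet_nil]
  | cons c s ih =>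
    have hc : ¬ c = '"' := fun hc => h (by simp [hc])
    have hs : '"' ∉ s := fun hm => h (List.mem_cons_of_mem _ hm)
    simp only [List.cons_append, bdGoA]
    rw [if_neg (by simp : ¬ (false = true)), if_neg hc]
    split_ifs with h1 h2
    · rw [ih hs]
      congr 1
      rcases h1 with h' | h' | h' <;> subst h' <;> simp [bdNet, List.count_cons] <;> ring
    · rw [ih hs]
      congr 1
      rcases h2 with h' | h' | h' <;> subst h' <;> simp [bdNet, List.count_cons] <;> ring
    · rw [ih hs]
      congr 1
      push_neg at h1 h2
      obtain ⟨a1, a2, a3⟩ := h1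
      obtain ⟨b1, b2, b3⟩ := h2
      simp [bdNet, List.count_cons, a1, a2, a3, b1, b2, b3]

-- A inside an unterminated string: depth unchanged
theorem bdGoA_true_noq_aux : ∀ (n : Nat) (s : List Char), s.length ≤ n → '"' ∉ s →
    ∀ (d : Int), bdGoA s true d = d
  | _, [], _, _, _ => by simp [bdGoA]
  | 0, _ :: _, h, _, _ => by simp at h
  | (n+1), c :: rest, h, hq, d => by
    have hc : ¬ c = '"' := fun hc => hq (by simp [hc])
    have hr : rest.length ≤ n := by simpa using h
    have ht : rest.tail.length ≤ n := le_trans (by simpa using List.length_tail_le rest) hr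
    have hrq : '"' ∉ rest := fun hm => hq (List.mem_cons_of_mem _ hm)
    have htq : '"' ∉ rest.tail := fun hm => hrq (List.mem_of_mem_tail hm)
    simp only [bdGoA, if_pos, if_neg hc]
    split_ifs
    · exact bdGoA_true_noq_aux n rest.tail ht htq d
    · exact bdGoA_true_noq_aux n rest hr hrq d

theorem bdGoA_true_noq (s : List Char) (h : '"' ∉ s) (d : Int) : bdGoA s true d = d :=
  bdGoA_true_noq_aux s.length s le_rfl h d

-- A inside a string: consumes up to the closing quote; the quote is escaped iff the
-- trailing backslash run of the string body is odd
theorem bdTrail_nil : bdTrail [] = 0 := by simp [bdTrail]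

theorem bdTrail_singleton_bs : bdTrail ['\\'] = 1 := by simp [bdTrail, List.takeWhile]

theorem bdGoA_true_append_aux : ∀ (n : Nat) (s : List Char), s.length ≤ n → '"' ∉ s →
    ∀ (r : List Char) (d : Int),
    bdGoA (s ++ '"' :: r) true d =
      if bdTrail s % 2 = 0 then bdGoA r false d else bdGoA r true d
  | _, [], _, _, r, d => by simp [bdGoA, bdTrail_nil]
  | 0, _ :: _, h, _, _, _ => by simp at h
  | (n+1), c :: s, h, hq, r, d => by
    have hc : ¬ c = '"' := fun hc => hq (by simp [hc])
    have hs : s.length ≤ n := by simpa using h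
    have hsq : '"' ∉ s := fun hm => hq (List.mem_cons_of_mem _ hm)
    by_cases hbs : c = '\\'
    · subst hbs
      match s with
      | [] =>
        rw [bdTrail_singleton_bs]
        simp [bdGoA]
      | c2 :: s2 =>
        have hs2 : s2.length ≤ n := by simp at hs; omega
        have hs2q : '"' ∉ s2 := fun hm => hsq (List.mem_cons_of_mem _ hm)
        have hstep : bdGoA ('\\' :: c2 :: s2 ++ '"' :: r) true d
            = bdGoA (s2 ++ '"' :: r) true d := by
          simp [bdGoA]
        rw [hstep, bdGoA_true_append_aux n s2 hs2 hs2q r d]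
        have := bdTrail_two_parity c2 s2
        by_cases hp : bdTrail s2 % 2 = 0
        · rw [if_pos hp, if_pos (by omega)]
        · rw [if_neg hp, if_neg (by omega)]
    · have hstep : bdGoA (c :: s ++ '"' :: r) true d = bdGoA (s ++ '"' :: r) true d := by
        simp [bdGoA, hbs, hc]
      rw [hstep, bdGoA_true_append_aux n s hs hsq r d, bdTrail_cons_ne hbs]

theorem bdGoA_true_append (s : List Char) (h : '"' ∉ s) (r : List Char) (d : Int) :
    bdGoA (s ++ '"' :: r) true d =
      if bdTrail s % 2 = 0 then bdGoA r false d else bdGoA r true d :=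
  bdGoA_true_append_aux s.length s le_rfl h r d

-- splitOn.go with sep ['"']: fuel ≥ length is enough, accumulator laws, and the step
theorem bdGo_noq (l : List Char) : '"' ∉ l → ∀ (fuel : Nat), l.length ≤ fuel →
    ∀ (cur : List Char) (acc : List (List Char)),
    PySem.Chars.splitOn.go ['"'] fuel l cur acc = ((cur.reverse ++ l) :: acc).reverse := by
  induction l with
  | nil =>
    intro _ fuel _ cur acc
    cases fuel <;> simp [PySem.Chars.splitOn.go]
  | cons c rest ih =>
    intro h fuel hf cur acc
    have hc : ¬ c = '"' := fun hc => h (by simp [hc])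
    match fuel with
    | 0 => simp at hf
    | (n+1) =>
      simp only [PySem.Chars.splitOn.go]
      rw [if_neg (by simp [List.isPrefixOf]; exact fun hcc => hc hcc.symm)]
      rw [ih (fun hm => h (List.mem_cons_of_mem _ hm)) n (by simpa using hf)]
      simp

theorem bdGo_step (s : List Char) : '"' ∉ s → ∀ (r : List Char) (fuel : Nat),
    s.length + 1 ≤ fuel → ∀ (cur : List Char) (acc : List (List Char)),
    PySem.Chars.splitOn.go ['"'] fuel (s ++ '"' :: r) cur acc =
      PySem.Chars.splitOn.go ['"'] (fuel - s.length - 1) r [] ((cur.reverse ++ s) :: acc) := by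
  induction s with
  | nil =>
    intro _ r fuel hf cur acc
    match fuel with
    | (n+1) =>
      simp only [List.nil_append, PySem.Chars.splitOn.go]
      rw [if_pos (by simp [List.isPrefixOf])]
      simp
  | cons c rest ih =>
    intro h r fuel hf cur acc
    have hc : ¬ c = '"' := fun hc => h (by simp [hc])
    match fuel with
    | (n+1) =>
      simp only [List.cons_append, PySem.Chars.splitOn.go]
      rw [if_neg (by simp [List.isPrefixOf]; exact fun hcc => hc hcc.symm)]
      rw [ih (fun hm => h (List.mem_cons_of_mem _ hm)) r n (by simpa using hf)]
      simp only [List.reverse_cons, List.append_assoc, List.singleton_append,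
        List.length_cons]
      congr 2
      omega

theorem bdGo_acc (l : List Char) : ∀ (fuel : Nat), l.length ≤ fuel → ∀ (cur : List Char)
    (acc : List (List Char)),
    PySem.Chars.splitOn.go ['"'] fuel l cur acc
      = acc.reverse ++ PySem.Chars.splitOn.go ['"'] fuel l cur [] := by
  induction l with
  | nil =>
    intro fuel _ cur acc
    cases fuel <;> simp [PySem.Chars.splitOn.go]
  | cons c rest ih =>
    intro fuel h cur acc
    match fuel with
    | (n+1) =>
      simp only [PySem.Chars.splitOn.go]
      by_cases hp : ['"'].isPrefixOf (c :: rest) = true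
      · rw [if_pos hp, if_pos hp]
        have hd : List.drop ['"'].length (c :: rest) = rest := by simp
        rw [hd]
        have hr : rest.length ≤ n := by simp at h; omega
        rw [ih n hr [] (cur.reverse :: acc), ih n hr [] (cur.reverse :: [])]
        simp
      · rw [if_neg hp, if_neg hp]
        exact ih n (by simpa using h) _ _

theorem bdSplit_noq (l : List Char) (h : '"' ∉ l) : PySem.Chars.splitOn l ['"'] = [l] := by
  unfold PySem.Chars.splitOn
  rw [bdGo_noq l h (l.length + 1) (by omega)]
  simp

theorem bdSplit_step (s : List Char) (h : '"' ∉ s) (r : List Char) :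
    PySem.Chars.splitOn (s ++ '"' :: r) ['"'] = s :: PySem.Chars.splitOn r ['"'] := by
  unfold PySem.Chars.splitOn
  have hlen : (s ++ '"' :: r).length + 1 = s.length + r.length + 2 := by simp; omega
  rw [hlen, bdGo_step s h r _ (by omega)]
  have h1 : s.length + r.length + 2 - s.length - 1 = r.length + 1 := by omega
  rw [h1, bdGo_acc r (r.length + 1) (by omega)]
  simp

-- Chars.count of a single character is List.count
theorem bdCount_go_single (c : Char) (l : List Char) : ∀ (fuel : Nat), l.length ≤ fuel →
    ∀ (acc : Nat), PySem.Chars.count.go [c] fuel l acc = acc + l.count c := by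
  induction l with
  | nil =>
    intro fuel _ acc
    cases fuel <;> simp [PySem.Chars.count.go]
  | cons x t ih =>
    intro fuel h acc
    match fuel with
    | (n+1) =>
      simp only [PySem.Chars.count.go]
      by_cases hx : c = x
      · rw [if_pos (by simp [List.isPrefixOf, hx])]
        have hd : List.drop [c].length (x :: t) = t := by simp
        rw [hd, ih n (by simpa using h)]
        subst hx
        simp [List.count_cons]
        omega
      · rw [if_neg (by simp [List.isPrefixOf]; exact fun hcc => hx hcc)]
        rw [ih n (by simpa using h)]
        have hxc : ¬ x = c := fun hcc => hx hcc.symm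
        simp [List.count_cons, hxc]

theorem bdCount_single (s : List Char) (c : Char) : PySem.Chars.count s [c] = s.count c := by
  unfold PySem.Chars.count
  rw [if_neg (by simp), bdCount_go_single c s s.length le_rfl 0]
  omega

-- net over the flattened kept segments
def bdNetFlat (ks : List (List Char)) : Int := bdNet ks.flatten

theorem bdNet_append (a b : List Char) : bdNet (a ++ b) = bdNet a + bdNet b := by
  simp [bdNet, List.count_append]
  ring

theorem bdNetFlat_nil : bdNetFlat [] = 0 := by simp [bdNetFlat, bdNet]

theorem bdNetFlat_append_singleton (ks : List (List Char)) (s : List Char) :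
    bdNetFlat (ks ++ [s]) = bdNetFlat ks + bdNet s := by
  simp [bdNetFlat, List.flatten_append, bdNet_append]

-- the main correspondence: B's fold over the remaining segments computes A's walk
theorem bdMain (r : List Char) :
    (∀ kept, bdNetFlat ((PySem.Chars.splitOn r ['"']).foldl bdStepB (kept, false)).1
        = bdNetFlat kept + bdGoA r false 0)
    ∧ (∀ kept, bdNetFlat ((PySem.Chars.splitOn r ['"']).foldl bdStepB (kept, true)).1
        = bdNetFlat kept + bdGoA r true 0) := by
  suffices h : ∀ (n : Nat) (r : List Char), r.length ≤ n →
      (∀ kept, bdNetFlat ((PySem.Chars.splitOn r ['"']).foldl bdStepB (kept, false)).1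
          = bdNetFlat kept + bdGoA r false 0)
      ∧ (∀ kept, bdNetFlat ((PySem.Chars.splitOn r ['"']).foldl bdStepB (kept, true)).1
          = bdNetFlat kept + bdGoA r true 0) from h r.length r le_rfl
  intro n
  induction n with
  | zero =>
    intro r hr
    have : r = [] := List.length_eq_zero_iff.mp (Nat.le_zero.mp hr)
    subst this
    rw [bdSplit_noq [] (by simp)]
    constructor <;> intro kept <;>
      simp [bdStepB, bdGoA, bdNetFlat_append_singleton, bdNet_nil] <;> split <;> simp
  | succ n ihn =>
    intro r hr
    by_cases hq : '"' ∈ r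
    · -- r = s ++ '"' :: t' with s the quote-free prefix
      set p : Char → Bool := fun c => !(c == '"') with hp
      set sseg := r.takeWhile p with hsseg
      set t := r.dropWhile p with ht
      have hdec : sseg ++ t = r := List.takeWhile_append_dropWhile
      have hsq : '"' ∉ sseg := by
        intro hm
        have := List.mem_takeWhile_imp hm
        simp [hp] at this
      have htne : t ≠ [] := by
        intro h0
        rw [h0, List.append_nil] at hdec
        exact hsq (hdec ▸ hq)
      have hhead : t.head htne = '"' := by
        have := List.head_dropWhile_not p (ht ▸ htne)
        simp only [hp, Bool.not_eq_false', beq_iff_eq] at this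
        simpa [← ht] using this
      obtain ⟨t', ht'⟩ : ∃ t', t = '"' :: t' :=
        ⟨t.tail, by conv_lhs => rw [← List.cons_head_tail htne, hhead]⟩
      have hrdec : r = sseg ++ '"' :: t' := by rw [← hdec, ht']
      have hlen : t'.length ≤ n := by
        have := congrArg List.length hrdec
        simp at this
        omega
      obtain ⟨ihP, ihQ⟩ := ihn t' hlen
      have hsplit := bdSplit_step sseg hsq t'
      constructor
      · intro kept
        rw [hrdec, hsplit]
        simp only [List.foldl_cons]
        have hstep1 : bdStepB (kept, false) sseg = (kept ++ [sseg], true) := by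
          simp [bdStepB]
        rw [hstep1, ihQ (kept ++ [sseg]), bdNetFlat_append_singleton]
        have hA : bdGoA (sseg ++ '"' :: t') false 0 = bdNet sseg + bdGoA t' true 0 := by
          rw [bdGoA_false_append sseg _ hsq 0]
          have : bdGoA ('"' :: t') false (0 + bdNet sseg) = bdGoA t' true (0 + bdNet sseg) := by
            simp [bdGoA]
          rw [this, bdGoA_add t' true (0 + bdNet sseg)]
          ring
        rw [hA]
        ring
      · intro kept
        rw [hrdec, hsplit]
        simp only [List.foldl_cons]
        rw [bdGoA_true_append sseg hsq t' 0]
        by_cases hpar : bdTrail sseg % 2 = 0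
        · have hstep1 : bdStepB (kept, true) sseg = (kept, false) := by
            simp only [bdStepB]
            rw [if_neg (by simp), if_pos (by rw [bdTrail_eq_sub]; exact hpar)]
          rw [hstep1, ihP kept, if_pos hpar]
        · have hstep1 : bdStepB (kept, true) sseg = (kept, true) := by
            simp only [bdStepB]
            rw [if_neg (by simp), if_neg (by rw [bdTrail_eq_sub]; exact hpar)]
          rw [hstep1, ihQ kept, if_neg hpar]
    · rw [bdSplit_noq r hq]
      constructor <;> intro kept
      · simp only [List.foldl_cons, List.foldl_nil]
        have hstep1 : bdStepB (kept, false) r = (kept ++ [r], true) := by simp [bdStepB]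
        rw [hstep1, bdNetFlat_append_singleton]
        have : bdGoA r false 0 = bdNet r := by
          have := bdGoA_false_append r [] hq 0
          simpa [bdGoA] using this
        rw [this]
      · simp only [List.foldl_cons, List.foldl_nil]
        rw [bdGoA_true_noq r hq 0]
        simp only [bdStepB]
        rw [if_neg (by simp)]
        split <;> simp

-- ===== VERDICT (by name: the statement is the Claim_ definition above) =====
theorem bdJoin_nil (parts : List (List Char)) : PySem.Chars.join [] parts = parts.flatten := by
  induction parts with
  | nil => simp [PySem.Chars.join, List.intercalate]
  | cons a t ih =>
    cases t with
    | nil => simp [PySem.Chars.join, List.intercalate]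
    | cons b t' =>
      simp only [PySem.Chars.join, List.intercalate] at ih ⊢
      simp [List.intersperse_cons₂, ih, List.flatten_cons]

theorem bracket_depth_py_spec : Claim_equal_bracket_depth_py := by
  intro text _
  unfold Spec_bracket_depth_py bracket_depth_py bracket_depth_py_alt
  simp only [bdJoin_nil, List.map_cons, List.map_nil, List.sum_cons, List.sum_nil,
    bdCount_single]
  have h := (bdMain text.toList).1 []
  simp only [bdNetFlat_nil, zero_add] at h
  rw [← h]
  simp [bdNetFlat, bdNet]
  ring
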